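-- pv_equiv track=rewrite | github.com/melwyn95/Two_Level-Encryption-Algorithm | DivideInBlocks.py | divide_in_blocks
-- ===== SOURCE A (Python) =====
-- def divide_in_blocks(UserInput):
--     blocks = []
--     number = 0
--     temp = []
--     for i in UserInput:
--         if number % 9 == 0 and number != 0:
--             blocks.append(temp)
--             temp = []
--             temp.append(i)
--             number += 1
--         else:
--             temp.append(i)
--             number += 1
--     while len(temp) < 9:
--         temp.append(" ")
--     blocks.append(temp)
--     return blocks
-- ===== SOURCE B (Python) =====
-- def divide_in_blocks(UserInput):
--     n = max(1, -(-len(UserInput) // 9))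
--     s = list(UserInput) + [" "] * (n * 9 - len(UserInput))
--     return [s[i * 9:(i + 1) * 9] for i in range(n)]
-- ===== Notes on version B (the rewrite author's own statement) =====
-- stated objective: alternative
-- what changed: A builds blocks element-by-element with a counter and pads only the trailing block in a while loop; B computes the block count once, pads the whole copied input to a multiple of 9 up front, and slices it into uniform 9-element chunks.
import Mathlib
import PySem

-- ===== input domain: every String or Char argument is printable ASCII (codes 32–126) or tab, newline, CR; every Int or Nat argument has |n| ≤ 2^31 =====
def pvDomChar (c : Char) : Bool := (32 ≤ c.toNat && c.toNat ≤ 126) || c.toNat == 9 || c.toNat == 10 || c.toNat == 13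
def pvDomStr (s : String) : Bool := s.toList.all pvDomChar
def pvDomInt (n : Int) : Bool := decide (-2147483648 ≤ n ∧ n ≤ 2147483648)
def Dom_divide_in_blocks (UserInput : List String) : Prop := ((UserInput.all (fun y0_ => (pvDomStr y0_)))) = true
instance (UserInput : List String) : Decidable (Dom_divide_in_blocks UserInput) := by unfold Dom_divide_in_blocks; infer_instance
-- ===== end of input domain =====

-- B re-implements A's chunk-then-pad-last loop as pad-the-whole-input-then-slice-uniform-chunks; same return value, no speed claim.

-- ===== PORT A =====
-- one step of A's for-loop, state = (blocks, number, temp)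
def stepA (st : List (List String) × Int × List String) (i : String) :
    List (List String) × Int × List String :=
  if PySem.Int.mod st.2.1 9 = 0 ∧ st.2.1 ≠ 0 then
    (st.1 ++ [st.2.2], st.2.1 + 1, [i])
  else
    (st.1, st.2.1 + 1, st.2.2 ++ [i])

-- the `while len(temp) < 9: temp.append(" ")` loop
def padA (temp : List String) : List String :=
  if _h : temp.length < 9 then padA (temp ++ [" "]) else temp
termination_by 9 - temp.length
decreasing_by simp [List.length_append]; omega

def divide_in_blocks (UserInput : List String) : List (List String) :=
  let st := UserInput.foldl stepA ([], 0, [])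
  st.1 ++ [padA st.2.2]

-- ===== PORT B =====
def divide_in_blocks_alt (UserInput : List String) : List (List String) :=
  let len : Int := UserInput.length
  let n : Int := max 1 (-(PySem.Int.floordiv (-len) 9))
  -- [" "] * k : the count n*9 - len is never negative here, so .toNat is exact
  let s := UserInput ++ List.replicate (n * 9 - len).toNat " "
  (PySem.List.pyRange 0 n 1).map (fun i => PySem.List.slice s (some (i * 9)) (some ((i + 1) * 9)))

-- ===== PRECONDITION & SPEC =====
def Spec_divide_in_blocks (UserInput : List String) (out : List (List String)) : Prop := out = divide_in_blocks_alt UserInput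
instance (UserInput : List String) (out : List (List String)) : Decidable (Spec_divide_in_blocks UserInput out) := by unfold Spec_divide_in_blocks; infer_instance

-- ===== CLAIM (what is proved, stated in full; the proofs are below) =====
def Claim_equal_divide_in_blocks : Prop := ∀ (UserInput : List String), Dom_divide_in_blocks UserInput → Spec_divide_in_blocks UserInput (divide_in_blocks UserInput)

-- ===== LEMMAS AND PROOFS =====

-- canonical description both ports are reduced to
def chunks (l : List String) : List (List String) :=
  if l.length ≤ 9 then [l ++ List.replicate (9 - l.length) " "]
  else l.take 9 :: chunks (l.drop 9)
termination_by l.length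
decreasing_by simp; omega

-- exactly m unpadded 9-chunks
def chunksE : Nat → List String → List (List String)
  | 0, _ => []
  | m + 1, s => s.take 9 :: chunksE m (s.drop 9)

lemma padA_eq (k : Nat) : ∀ (temp : List String), temp.length + k = 9 →
    padA temp = temp ++ List.replicate k " " := by
  induction k with
  | zero =>
      intro temp h
      rw [padA]
      simp [show ¬ temp.length < 9 by omega]
  | succ k ih =>
      intro temp h
      rw [padA]
      simp only [show temp.length < 9 by omega, dite_true]
      rw [ih (temp ++ [" "]) (by simp; omega)]
      simp [List.replicate_succ]

lemma loopA (l : List String) : ∀ (blocks : List (List String)) (temp : List String),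
    1 ≤ temp.length → temp.length ≤ 9 →
    (l.foldl stepA (blocks, (9 * blocks.length + temp.length : Int), temp)).1
      ++ [padA (l.foldl stepA (blocks, (9 * blocks.length + temp.length : Int), temp)).2.2]
    = blocks ++ chunks (temp ++ l) := by
  induction l with
  | nil =>
      intro blocks temp h1 h9
      simp only [List.foldl_nil, List.append_nil]
      rw [padA_eq (9 - temp.length) temp (by omega), chunks]
      simp [show temp.length ≤ 9 from h9]
  | cons i rest ih =>
      intro blocks temp h1 h9
      simp only [List.foldl_cons]
      have hm : PySem.Int.mod (9 * (blocks.length : Int) + temp.length) 9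
          = (temp.length : Int) % 9 := by
        rw [PySem.Int.mod_eq_emod_of_pos (by norm_num)]; omega
      by_cases hk : temp.length = 9
      · have hc : stepA (blocks, (9 * blocks.length + temp.length : Int), temp) i
            = (blocks ++ [temp], (9 * blocks.length + temp.length : Int) + 1, [i]) := by
          simp only [stepA]
          rw [if_pos ⟨by rw [hm, hk]; decide, by omega⟩]
        rw [hc]
        have harith : ((9 * (blocks.length : Int) + temp.length) + 1)
            = 9 * (((blocks ++ [temp]).length : Nat) : Int) + ((([i] : List String).length : Nat) : Int) := by
          simp [hk]; ring
        rw [harith, ih (blocks ++ [temp]) [i] (by simp) (by simp)]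
        have hch : chunks (temp ++ i :: rest) = temp :: chunks (i :: rest) := by
          rw [chunks]
          have hlen : (temp ++ i :: rest).length = 9 + (rest.length + 1) := by simp [hk]
          rw [if_neg (by omega)]
          congr 1
          · rw [List.take_append_of_le_length (by omega)]
            exact (List.take_of_length_le (by omega))
          · congr 1
            rw [List.drop_append_of_le_length (by omega)]
            simp [hk]
        rw [hch]
        simp
      · have hc : stepA (blocks, (9 * blocks.length + temp.length : Int), temp) i
            = (blocks, (9 * blocks.length + temp.length : Int) + 1, temp ++ [i]) := by
          simp only [stepA, hm]
          rw [if_neg]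
          intro ⟨hz, _⟩
          omega
        rw [hc]
        have harith : ((9 * (blocks.length : Int) + temp.length) + 1)
            = 9 * ((blocks.length : Nat) : Int) + (((temp ++ [i]).length : Nat) : Int) := by
          simp; ring
        rw [harith, ih blocks (temp ++ [i]) (by simp) (by simp; omega)]
        simp

lemma A_eq_chunks (l : List String) : divide_in_blocks l = chunks l := by
  cases l with
  | nil =>
      show [padA []] = chunks []
      rw [padA_eq 9 [] (by simp), chunks]
      simp
  | cons i rest =>
      show (( (i :: rest).foldl stepA ([], 0, [])).1
        ++ [padA ((i :: rest).foldl stepA ([], 0, [])).2.2]) = chunks (i :: rest)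
      rw [List.foldl_cons]
      have h0 : stepA (([] : List (List String)), (0 : Int), ([] : List String)) i
          = ([], 1, [i]) := by simp [stepA]
      rw [h0]
      have := loopA rest [] [i] (by simp) (by simp)
      simpa using this

lemma chunksE_slices (m : Nat) : ∀ (s : List String),
    (List.range m).map (fun k => ((s.drop (9 * k)).take 9)) = chunksE m s := by
  induction m with
  | zero => intro s; simp [chunksE]
  | succ m ih =>
      intro s
      rw [List.range_succ_eq_map, List.map_cons, List.map_map]
      have hunf : chunksE (m + 1) s = s.take 9 :: chunksE m (s.drop 9) := rfl
      rw [hunf, ← ih (s.drop 9)]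
      congr 1
      apply List.map_congr_left
      intro k _
      have h9k : 9 * (k + 1) = 9 + 9 * k := by ring
      simp [Function.comp, List.drop_drop, h9k]

lemma chunksE_pad : ∀ (q : Nat), 1 ≤ q → ∀ (l : List String), l.length ≤ 9 * q →
    (9 * q < l.length + 9 ∨ (l.length = 0 ∧ q = 1)) →
    chunksE q (l ++ List.replicate (9 * q - l.length) " ") = chunks l := by
  intro q
  induction q with
  | zero => intro h; exact absurd h (by omega)
  | succ m ih =>
      intro _ l hle hq
      by_cases hm : m = 0
      · subst hm
        have hL : l.length ≤ 9 := by omega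
        have hunf : chunksE 1 (l ++ List.replicate (9 * 1 - l.length) " ")
            = [(l ++ List.replicate (9 * 1 - l.length) " ").take 9] := rfl
        rw [hunf, chunks, if_pos hL]
        rw [List.take_of_length_le (by simp; omega)]
      · have hmp : 1 ≤ m := by omega
        have hgt : 9 < l.length := by omega
        have hunf : chunksE (m + 1) (l ++ List.replicate (9 * (m + 1) - l.length) " ")
            = (l ++ List.replicate (9 * (m + 1) - l.length) " ").take 9
              :: chunksE m ((l ++ List.replicate (9 * (m + 1) - l.length) " ").drop 9) := rfl
        rw [hunf, chunks, if_neg (by omega)]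
        congr 1
        · rw [List.take_append_of_le_length (by omega)]
        · rw [List.drop_append_of_le_length (by omega)]
          have hrep : 9 * (m + 1) - l.length = 9 * m - (l.drop 9).length := by
            simp; omega
          rw [hrep]
          exact ih hmp (l.drop 9) (by simp; omega) (by left; simp; omega)

lemma B_eq_chunks (l : List String) : divide_in_blocks_alt l = chunks l := by
  obtain ⟨q, hq1, hle, hbound, hn⟩ :
      ∃ q : Nat, 1 ≤ q ∧ l.length ≤ 9 * q ∧
        (9 * q < l.length + 9 ∨ (l.length = 0 ∧ q = 1)) ∧
        max 1 (-(PySem.Int.floordiv (-((l.length : Nat) : Int)) 9)) = (q : Int) := by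
    refine ⟨max 1 ((l.length + 8) / 9), by omega, by omega, by omega, ?_⟩
    have hfd : -(PySem.Int.floordiv (-((l.length : Nat) : Int)) 9)
        = (((l.length + 8) / 9 : Nat) : Int) := by
      rw [PySem.Int.neg_floordiv_neg_eq_iff_of_pos (by norm_num)]
      constructor <;> push_cast <;> omega
    rw [hfd]
    push_cast
    ring
  have hcnt : (((q : Int)) * 9 - ((l.length : Nat) : Int)).toNat = 9 * q - l.length := by omega
  have hmap : ∀ s : List String,
      (PySem.List.pyRange 0 (q : Int) 1).map
        (fun i => PySem.List.slice s (some (i * 9)) (some ((i + 1) * 9)))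
      = chunksE q s := by
    intro s
    rw [PySem.List.pyRange_zero_natCast q, List.map_map, ← chunksE_slices q s]
    apply List.map_congr_left
    intro k _
    simp only [Function.comp]
    have h1 : ((k : Nat) : Int) * 9 = ((9 * k : Nat) : Int) := by push_cast; ring
    have h2 : (((k : Nat) : Int) + 1) * 9 = ((9 * k + 9 : Nat) : Int) := by push_cast; ring
    rw [h1, h2, PySem.List.slice_natCast]
    congr 1
    omega
  simp only [divide_in_blocks_alt]
  rw [hn, hcnt, hmap]
  exact chunksE_pad q hq1 l hle hbound

-- ===== VERDICT (by name: the statement is the Claim_ definition above) =====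
theorem divide_in_blocks_spec : Claim_equal_divide_in_blocks := by
  intro l _
  unfold Spec_divide_in_blocks
  rw [A_eq_chunks, B_eq_chunks]
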